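-- pv_equiv track=rewrite | github.com/CityScope/pyGTFSHandler | pyGTFSHandler/scripts/stop_quality.py | check_route_type_mapping
-- ===== SOURCE A (Python) =====
-- def check_route_type_mapping(route_type_mapping):
--     seen_values = set()
--     new_mapping = {}
--
--     for k, v in reversed(list(route_type_mapping.items())):
--         v_tuple = tuple(v) if isinstance(v, list) else v
--         if v_tuple not in seen_values:
--             new_mapping[k] = v
--             seen_values.add(v_tuple)
--
--     # Reverse again to restore original order
--     new_mapping = dict(reversed(list(new_mapping.items())))
--     return new_mapping
-- ===== SOURCE B (Python) =====
-- def check_route_type_mapping(route_type_mapping):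
--     # One forward pass: remember, for each (normalized) value, the key of its
--     # last occurrence; then keep exactly the items holding that key, in order.
--     last_key = {}
--     for k, v in route_type_mapping.items():
--         last_key[tuple(v) if isinstance(v, list) else v] = k
--     return {
--         k: v
--         for k, v in route_type_mapping.items()
--         if last_key[tuple(v) if isinstance(v, list) else v] == k
--     }
-- ===== Notes on version B (the rewrite author's own statement) =====
-- stated objective: simpler
-- what changed: Replaces the reverse-iterate/seen-set/reverse-again scheme with a single forward index pass (value -> key of its last occurrence) followed by one forward filter of the original items; no reversals and no incremental dict rebuilding.
import Mathlib
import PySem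

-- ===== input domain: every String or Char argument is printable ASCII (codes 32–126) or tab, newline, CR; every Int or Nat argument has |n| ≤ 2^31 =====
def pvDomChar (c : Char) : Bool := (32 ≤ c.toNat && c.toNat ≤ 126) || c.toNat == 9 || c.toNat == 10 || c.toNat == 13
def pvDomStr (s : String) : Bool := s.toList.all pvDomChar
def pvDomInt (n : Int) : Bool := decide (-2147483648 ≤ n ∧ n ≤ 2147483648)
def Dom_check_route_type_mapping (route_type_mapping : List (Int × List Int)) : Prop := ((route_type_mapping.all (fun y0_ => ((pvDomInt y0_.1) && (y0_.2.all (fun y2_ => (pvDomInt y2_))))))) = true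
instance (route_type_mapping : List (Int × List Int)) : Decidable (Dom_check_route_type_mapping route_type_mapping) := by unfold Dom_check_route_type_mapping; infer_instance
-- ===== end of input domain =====

-- B replaces A's reverse/seen-set/reverse-again scheme by one forward index pass plus one
-- forward filter (objective: simpler). Dict argument is modelled as an association list and
-- normalised with PySem.Dict.ofList (Python dict construction: last value wins, first position kept).

-- ===== PORT A =====
def check_route_type_mapping (route_type_mapping : List (Int × List Int)) : List (Int × List Int) :=
  let items := (PySem.Dict.ofList route_type_mapping).items
  -- for k, v in reversed(list(...items())): if tuple(v) not in seen: new_mapping[k] = v; seen.add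
  let st := items.reverse.foldl
    (fun (st : PySem.Set (List Int) × PySem.Dict Int (List Int)) kv =>
      if PySem.Set.contains st.1 kv.2 then st
      else (PySem.Set.add st.1 kv.2, st.2.insert kv.1 kv.2))
    (PySem.Set.empty, PySem.Dict.empty)
  -- dict(reversed(list(new_mapping.items())))
  (PySem.Dict.ofList st.2.items.reverse).items

-- ===== PORT B =====
def check_route_type_mapping_alt (route_type_mapping : List (Int × List Int)) : List (Int × List Int) :=
  let items := (PySem.Dict.ofList route_type_mapping).items
  -- last_key[tuple(v)] = k  (forward pass, last key wins)
  let last_key := items.foldl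
    (fun (d : PySem.Dict (List Int) Int) kv => d.insert kv.2 kv.1) PySem.Dict.empty
  -- {k: v for k, v in items if last_key[tuple(v)] == k}
  items.filter (fun kv => last_key.get? kv.2 == some kv.1)

-- ===== PRECONDITION & SPEC =====
def Spec_check_route_type_mapping (route_type_mapping : List (Int × List Int)) (out : List (Int × List Int)) : Prop := out = check_route_type_mapping_alt route_type_mapping
instance (route_type_mapping : List (Int × List Int)) (out : List (Int × List Int)) : Decidable (Spec_check_route_type_mapping route_type_mapping out) := by unfold Spec_check_route_type_mapping; infer_instance

-- ===== CLAIM (what is proved, stated in full; the proofs are below) =====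
def Claim_equal_check_route_type_mapping : Prop := ∀ (route_type_mapping : List (Int × List Int)), Dom_check_route_type_mapping route_type_mapping → Spec_check_route_type_mapping route_type_mapping (check_route_type_mapping route_type_mapping)

-- ===== LEMMAS AND PROOFS =====

-- key of the first pair whose value is v
def pvFirstOcc : List (Int × List Int) → List Int → Option Int
  | [], _ => none
  | kv :: t, v => if kv.2 = v then some kv.1 else pvFirstOcc t v

theorem pvFirstOcc_append (a b : List (Int × List Int)) (v : List Int) :
    pvFirstOcc (a ++ b) v =
      match pvFirstOcc a v with | some k => some k | none => pvFirstOcc b v := by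
  induction a with
  | nil => simp [pvFirstOcc]
  | cons x t ih =>
      simp only [List.cons_append, pvFirstOcc]
      split_ifs with h
      · rfl
      · rw [ih]

-- B's index dict looks up the key of the LAST occurrence of a value
theorem pvLastKey_get? (l : List (Int × List Int)) (d : PySem.Dict (List Int) Int) (v : List Int) :
    (l.foldl (fun d kv => d.insert kv.2 kv.1) d).get? v =
      match pvFirstOcc l.reverse v with | some k => some k | none => d.get? v := by
  induction l generalizing d with
  | nil => simp [pvFirstOcc]
  | cons x t ih =>
      simp only [List.foldl_cons, List.reverse_cons]
      rw [ih, pvFirstOcc_append]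
      cases pvFirstOcc t.reverse v with
      | some k => rfl
      | none =>
          simp only [pvFirstOcc, PySem.Dict.get?_insert]
          by_cases h : x.2 = v
          · rw [if_pos h, if_pos h.symm]
          · rw [if_neg h, if_neg (fun he => h he.symm)]

-- the pairs A's reversed loop keeps, relative to an already-seen set
def pvKeepFirst : List (Int × List Int) → PySem.Set (List Int) → List (Int × List Int)
  | [], _ => []
  | kv :: t, s => if kv.2 ∈ s then pvKeepFirst t s else kv :: pvKeepFirst t (PySem.Set.add s kv.2)

theorem pvFoldA_items (r : List (Int × List Int)) (s : PySem.Set (List Int))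
    (nm : PySem.Dict Int (List Int))
    (hfresh : ∀ kv ∈ r, nm.contains kv.1 = false) (hnd : (r.map Prod.fst).Nodup) :
    (r.foldl
      (fun (st : PySem.Set (List Int) × PySem.Dict Int (List Int)) kv =>
        if PySem.Set.contains st.1 kv.2 then st
        else (PySem.Set.add st.1 kv.2, st.2.insert kv.1 kv.2))
      (s, nm)).2.items = nm.items ++ pvKeepFirst r s := by
  induction r generalizing s nm with
  | nil => simp [pvKeepFirst]
  | cons kv t ih =>
      simp only [List.map_cons, List.nodup_cons] at hnd
      by_cases h : kv.2 ∈ s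
      · have hc : PySem.Set.contains s kv.2 = true := (PySem.Set.contains_iff s kv.2).mpr h
        simp only [List.foldl_cons, hc, if_true, pvKeepFirst, h]
        exact ih s nm (fun kv' h' => hfresh kv' (List.mem_cons_of_mem _ h')) hnd.2
      · have hc : PySem.Set.contains s kv.2 = false := by
          cases hc : PySem.Set.contains s kv.2
          · rfl
          · exact absurd ((PySem.Set.contains_iff s kv.2).mp hc) h
        simp only [List.foldl_cons, hc, Bool.false_eq_true, if_false, pvKeepFirst, h]
        rw [ih (PySem.Set.add s kv.2) (nm.insert kv.1 kv.2)
              (fun kv' h' => by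
                rw [PySem.Dict.contains_insert]
                have hne : kv'.1 ≠ kv.1 := by
                  intro he
                  exact hnd.1 (he ▸ List.mem_map_of_mem h')
                simp [hne, hfresh kv' (List.mem_cons_of_mem _ h')])
              hnd.2]
        rw [PySem.Dict.items_insert_of_not_contains nm kv.2 (hfresh kv (List.mem_cons_self))]
        simp

-- pvKeepFirst is a filter: keep a pair iff its value is fresh and it is the first with that value
theorem pvKeepFirst_filter (r : List (Int × List Int)) (s : PySem.Set (List Int))
    (hnd : (r.map Prod.fst).Nodup) :
    pvKeepFirst r s =
      r.filter (fun kv => !(decide (kv.2 ∈ s)) && (pvFirstOcc r kv.2 == some kv.1)) := by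
  induction r generalizing s with
  | nil => simp [pvKeepFirst]
  | cons kv t ih =>
      simp only [List.map_cons, List.nodup_cons] at hnd
      by_cases h : kv.2 ∈ s
      · simp only [pvKeepFirst, h, if_true, List.filter_cons, decide_true, Bool.not_true,
          Bool.false_and, Bool.false_eq_true, if_false]
        rw [ih s hnd.2]
        apply List.filter_congr
        intro kv' h'
        by_cases he : kv.2 = kv'.2
        · have : kv'.2 ∈ s := he ▸ h
          simp [this]
        · simp [pvFirstOcc, he]
      · simp only [pvKeepFirst, h, if_false, List.filter_cons, decide_false, Bool.not_false,
          Bool.true_and]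
        have hfo : pvFirstOcc (kv :: t) kv.2 = some kv.1 := by simp [pvFirstOcc]
        simp only [hfo, BEq.rfl, if_true]
        rw [ih (PySem.Set.add s kv.2) hnd.2]
        congr 1
        apply List.filter_congr
        intro kv' h'
        by_cases he : kv.2 = kv'.2
        · have hmem : kv'.2 ∈ PySem.Set.add s kv.2 :=
            (PySem.Set.mem_add s kv.2 kv'.2).mpr (Or.inr he.symm)
          have hne : kv.1 ≠ kv'.1 := by
            intro hk
            exact hnd.1 (hk ▸ List.mem_map_of_mem h')
          simp [pvFirstOcc, he, hne]
        · have : (kv'.2 ∈ PySem.Set.add s kv.2) ↔ kv'.2 ∈ s := by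
            rw [PySem.Set.mem_add]
            constructor
            · rintro (hs | hs)
              · exact hs
              · exact absurd hs.symm he
            · exact Or.inl
          simp [pvFirstOcc, he, this]

-- a list with distinct keys is its own dict
theorem pvOfList_items_self (ps : List (Int × List Int)) (h : (ps.map Prod.fst).Nodup) :
    (PySem.Dict.ofList ps).items = ps := by
  have := PySem.Dict.items_foldl_insert_fresh (l := ps) (k := Prod.fst) (v := Prod.snd)
      (d := PySem.Dict.empty) (fun a _ => PySem.Dict.contains_empty a.1) h
  simpa [PySem.Dict.ofList, PySem.Dict.update] using this

-- ===== VERDICT (by name: the statement is the Claim_ definition above) =====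
theorem check_route_type_mapping_spec : Claim_equal_check_route_type_mapping := by
  intro m _
  unfold Spec_check_route_type_mapping check_route_type_mapping check_route_type_mapping_alt
  set l := (PySem.Dict.ofList m).items with hl
  have hk : (l.map Prod.fst).Nodup := PySem.Dict.nodup_keys_ofList m
  have hkr : (l.reverse.map Prod.fst).Nodup := by
    rw [List.map_reverse]; exact List.nodup_reverse.mpr hk
  have hA := pvFoldA_items l.reverse PySem.Set.empty PySem.Dict.empty
      (fun kv _ => PySem.Dict.contains_empty kv.1) hkr
  have hKF := pvKeepFirst_filter l.reverse PySem.Set.empty hkr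
  have hp : (fun kv : Int × List Int =>
        !(decide (kv.2 ∈ (PySem.Set.empty : PySem.Set (List Int)))) &&
          (pvFirstOcc l.reverse kv.2 == some kv.1))
      = fun kv => pvFirstOcc l.reverse kv.2 == some kv.1 := by
    funext kv
    simp [PySem.Set.empty]
  rw [hp] at hKF
  have hitems : (l.reverse.foldl
      (fun (st : PySem.Set (List Int) × PySem.Dict Int (List Int)) kv =>
        if PySem.Set.contains st.1 kv.2 then st
        else (PySem.Set.add st.1 kv.2, st.2.insert kv.1 kv.2))
      (PySem.Set.empty, PySem.Dict.empty)).2.items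
      = l.reverse.filter (fun kv => pvFirstOcc l.reverse kv.2 == some kv.1) := by
    rw [hA, hKF]; simp [PySem.Dict.empty]
  simp only [hitems]
  rw [List.filter_reverse]
  have hsub : (((l.filter (fun kv => pvFirstOcc l.reverse kv.2 == some kv.1)).reverse.reverse).map
      Prod.fst).Nodup := by
    rw [List.reverse_reverse]
    exact (List.Sublist.map Prod.fst List.filter_sublist).nodup hk
  rw [List.reverse_reverse] at hsub
  rw [List.reverse_reverse, pvOfList_items_self _ hsub]
  apply List.filter_congr
  intro kv _
  rw [pvLastKey_get? l PySem.Dict.empty kv.2]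
  cases pvFirstOcc l.reverse kv.2 with
  | some k => rfl
  | none => simp [PySem.Dict.get?_empty]
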